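-- pv_equiv track=rewrite | github.com/anuragr81/research | linguistics/panini/rules.py | pratyaahaara
-- ===== SOURCE A (Python) =====
-- def pratyaahaara(start,end):
--     plist= ({'letters':("a","i","u",),'marker':'Nn'},{'letters':('Ri','lRi'),'marker':'k'},
--         {'letters':('e','o',),'marker':'Ng'},{'letters':('ai','au'),'marker':'ch'},{'letters':('h','y','v','r',),'marker':'Xt'},{'letters':('l',),'marker':'N'},
--         {'letters':('Nc','m','Ng','Nn','n'),'marker':'m'},{'letters':('jh','bh'),'marker':'Nc'},{'letters':('gh','Xdh','dh'),'marker':'Xsh'},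
--         {'letters':('j','b','g','Xd','d',),'marker':'sh'},{'letters':('kh','ph','chh','Xth','th','ch','Xt','t',),'marker':'v'},
--         {'letters':('k','p',),'marker':'y'},{'letters':('sh','Xsh','s',),'marker':'r'},{'letters':('h',),'marker':'l'},)
--     markers = [p['marker'] for p in plist]
--     if end not in markers:
--         raise ValueError("Unkown marker: %s" % end)
--     entries = [(i,j) for i,j in enumerate(plist) if end==j['marker']]
--     if len(entries)>1:
--         raise RuntimeError("Multiple entries not supported")
--     else:
--         not_found = True
--         for i,entry in enumerate(plist):
--             if start in entry['letters']:
--                 not_found = False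
--                 results = plist[i:(entries[0][0]+1)]
--                 output = []
--                 for res_entry in results:
--                     output = output+list(res_entry['letters'])
--                 return tuple(output)
--
--         if not_found:
--             raise ValueError("Unknown starting letter: %s" % start)
-- ===== SOURCE B (Python) =====
-- # Flat representation: one ordered letter sequence with group indices, plus
-- # marker->group and letter->first-group maps built once.
-- _GROUPS = (("a", "i", "u"), ("Ri", "lRi"), ("e", "o"), ("ai", "au"),
--            ("h", "y", "v", "r"), ("l",), ("Nc", "m", "Ng", "Nn", "n"),
--            ("jh", "bh"), ("gh", "Xdh", "dh"), ("j", "b", "g", "Xd", "d"),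
--            ("kh", "ph", "chh", "Xth", "th", "ch", "Xt", "t"), ("k", "p"),
--            ("sh", "Xsh", "s"), ("h",))
-- _MARKERS = ("Nn", "k", "Ng", "ch", "Xt", "N", "m", "Nc", "Xsh", "sh", "v", "y", "r", "l")
-- _END = {m: i for i, m in enumerate(_MARKERS)}
-- _FLAT = [(letter, gi) for gi, group in enumerate(_GROUPS) for letter in group]
-- _STARTG = {}
-- for _letter, _gi in _FLAT:
--     _STARTG.setdefault(_letter, _gi)
--
-- def pratyaahaara(start, end):
--     if end not in _END:
--         raise ValueError("Unkown marker: %s" % end)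
--     e = _END[end]
--     if start not in _STARTG:
--         raise ValueError("Unknown starting letter: %s" % start)
--     g = _STARTG[start]
--     return tuple(letter for letter, gi in _FLAT if g <= gi <= e)
-- ===== Notes on version B (the rewrite author's own statement) =====
-- stated objective: idiomatic
-- what changed: Replaces the dict-of-entries scan with per-call enumerate/slice/concat by a flat ordered letter sequence with group indices plus marker->index and letter->first-group maps built once; the result is a single filter over the flat sequence.
import Mathlib
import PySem

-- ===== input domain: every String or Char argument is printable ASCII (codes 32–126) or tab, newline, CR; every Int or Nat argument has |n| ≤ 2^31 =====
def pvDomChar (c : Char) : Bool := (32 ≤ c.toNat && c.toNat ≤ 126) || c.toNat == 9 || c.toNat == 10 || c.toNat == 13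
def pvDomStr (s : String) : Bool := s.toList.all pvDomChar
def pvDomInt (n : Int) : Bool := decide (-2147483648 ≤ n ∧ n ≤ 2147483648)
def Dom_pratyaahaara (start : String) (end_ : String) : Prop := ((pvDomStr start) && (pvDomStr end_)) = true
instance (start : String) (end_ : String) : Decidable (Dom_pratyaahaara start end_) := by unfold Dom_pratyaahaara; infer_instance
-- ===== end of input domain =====

-- B represents the Shiva-sutra table as one flat letter sequence with group indices plus
-- marker->index / letter->first-group lookups, instead of slicing a list of dict entries.


-- ===== PORT A =====
def pvPlist : List (List String × String) :=
  [(["a","i","u"],"Nn"), (["Ri","lRi"],"k"), (["e","o"],"Ng"), (["ai","au"],"ch"),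
   (["h","y","v","r"],"Xt"), (["l"],"N"), (["Nc","m","Ng","Nn","n"],"m"),
   (["jh","bh"],"Nc"), (["gh","Xdh","dh"],"Xsh"), (["j","b","g","Xd","d"],"sh"),
   (["kh","ph","chh","Xth","th","ch","Xt","t"],"v"), (["k","p"],"y"),
   (["sh","Xsh","s"],"r"), (["h"],"l")]

-- the 'for i,entry in enumerate(plist): if start in entry["letters"]: …' loop;
-- falling off the loop is A's second ValueError (excluded by Pre_), ported as []
def pvLoopA (start : String) (eIdx : Int) : List (Int × (List String × String)) → List String
  | [] => []
  | (i, entry) :: rest =>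
    if start ∈ entry.1 then
      (PySem.List.slice pvPlist (some i) (some (eIdx + 1))).foldl
        (fun output r => output ++ r.1) []
    else pvLoopA start eIdx rest

def pratyaahaara (start : String) (end_ : String) : List String :=
  let markers := pvPlist.map (·.2)
  if end_ ∈ markers then
    let entries := (PySem.List.enumerate pvPlist).filter (fun ij => end_ == ij.2.2)
    if entries.length > 1 then []   -- 'raise RuntimeError' (unreachable: markers are distinct)
    else
      match entries with
      | [] => []                    -- unreachable given the membership test above
      | e0 :: _ => pvLoopA start e0.1 (PySem.List.enumerate pvPlist)
  else []                           -- 'raise ValueError("Unkown marker…")', excluded by Pre_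

-- ===== PORT B =====
def pvGroupsB : List (List String) :=
  [["a","i","u"], ["Ri","lRi"], ["e","o"], ["ai","au"], ["h","y","v","r"], ["l"],
   ["Nc","m","Ng","Nn","n"], ["jh","bh"], ["gh","Xdh","dh"], ["j","b","g","Xd","d"],
   ["kh","ph","chh","Xth","th","ch","Xt","t"], ["k","p"], ["sh","Xsh","s"], ["h"]]
def pvMarkersB : List String := ["Nn","k","Ng","ch","Xt","N","m","Nc","Xsh","sh","v","y","r","l"]
-- _END dict: marker -> its index
def pvEndIdxB (m : String) : Option Int := (PySem.List.index? pvMarkersB m).map (Int.ofNat)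
-- _FLAT: every letter with its group index, in table order
def pvFlatB : List (String × Int) :=
  (PySem.List.enumerate pvGroupsB).flatMap (fun gi => gi.2.map (fun l => (l, gi.1)))
-- _STARTG dict built with setdefault: letter -> first group containing it
def pvStartGB (l : String) : Option Int := (pvFlatB.find? (fun p => p.1 == l)).map (·.2)

def pratyaahaara_alt (start : String) (end_ : String) : List String :=
  match pvEndIdxB end_ with
  | none => []                      -- 'raise ValueError("Unkown marker…")', excluded by Pre_
  | some e =>
    match pvStartGB start with
    | none => []                    -- 'raise ValueError("Unknown starting letter…")', excluded by Pre_
    | some g => (pvFlatB.filter (fun p => decide (g ≤ p.2) && decide (p.2 ≤ e))).map (·.1)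

-- ===== PRECONDITION & SPEC =====
-- Pre_ excludes exactly the inputs where A raises: end_ must be one of the 14 markers and
-- start one of the table's letters.
def Pre_pratyaahaara (start : String) (end_ : String) : Prop :=
  end_ ∈ ["Nn","k","Ng","ch","Xt","N","m","Nc","Xsh","sh","v","y","r","l"] ∧
  start ∈ ["a","i","u","Ri","lRi","e","o","ai","au","h","y","v","r","l","Nc","m","Ng","Nn","n",
           "jh","bh","gh","Xdh","dh","j","b","g","Xd","d","kh","ph","chh","Xth","th","ch","Xt","t",
           "k","p","sh","Xsh","s"]
instance (start : String) (end_ : String) : Decidable (Pre_pratyaahaara start end_) := by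
  unfold Pre_pratyaahaara; infer_instance

def pvWitness_pratyaahaara : String × String := ("a", "ch")

def Spec_pratyaahaara (start : String) (end_ : String) (out : List String) : Prop := out = pratyaahaara_alt start end_
instance (start : String) (end_ : String) (out : List String) : Decidable (Spec_pratyaahaara start end_ out) := by unfold Spec_pratyaahaara; infer_instance

-- ===== CLAIM (what is proved, stated in full; the proofs are below) =====
def Claim_equal_pratyaahaara : Prop := ∀ (start : String) (end_ : String), Dom_pratyaahaara start end_ → Pre_pratyaahaara start end_ → Spec_pratyaahaara start end_ (pratyaahaara start end_)

-- ===== LEMMAS AND PROOFS =====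

-- ===== VERDICT (by name: the statement is the Claim_ definition above) =====
theorem pratyaahaara_spec : Claim_equal_pratyaahaara := by
  intro start end_ _ hpre
  obtain ⟨he, hs⟩ := hpre
  unfold Spec_pratyaahaara
  fin_cases hs <;> fin_cases he <;> decide
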